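-- pv_equiv track=rewrite | github.com/btonasse/HuffEncoderDecoder | main.py | code_Gen
-- ===== SOURCE A (Python) =====
-- def code_Gen(tree):
--     '''
--     Generates the code mapping and returns a dictionary
--     '''
--     root = max(tree.keys(),key=lambda x: len(x)) #gets the root key of the tree
--     codeDict = {}
--     for char in root:
--       code = ''
--       for child in tree.values():
--         if child:
--           if char in child[0]:
--             code = '0' + code
--           elif char in child[1]:
--             code = '1' + code
--         else:
--           continue
--       codeDict[char] = code
--     return codeDict
-- ===== SOURCE B (Python) =====
-- def code_Gen(tree):
--     '''
--     Generates the code mapping and returns a dictionary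
--     '''
--     root = max(tree.keys(), key=lambda x: len(x))
--     codes = {c: '' for c in root}
--     for child in reversed(list(tree.values())):
--         if not child:
--             continue
--         zero = dict.fromkeys(child[0])
--         one = child[1] if len(child) > 1 else ''
--         for c in zero:
--             if c in codes:
--                 codes[c] = codes[c] + '0'
--         for c in dict.fromkeys(one):
--             if c not in zero and c in codes:
--                 codes[c] = codes[c] + '1'
--     return codes
-- ===== Notes on version B (the rewrite author's own statement) =====
-- stated objective: alternative
-- what changed: Instead of scanning every child's strings once per root character (per-character inner pass over all nodes), B makes a single pass over the tree values in reverse, deduplicates each child's two strings once and distributes the next code bit ('0'/'1' with the same if/elif precedence) to the characters they contain via dict updates, preserving key order; it trades A's repeated substring scans for one-pass set/dict bookkeeping.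
import Mathlib
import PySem

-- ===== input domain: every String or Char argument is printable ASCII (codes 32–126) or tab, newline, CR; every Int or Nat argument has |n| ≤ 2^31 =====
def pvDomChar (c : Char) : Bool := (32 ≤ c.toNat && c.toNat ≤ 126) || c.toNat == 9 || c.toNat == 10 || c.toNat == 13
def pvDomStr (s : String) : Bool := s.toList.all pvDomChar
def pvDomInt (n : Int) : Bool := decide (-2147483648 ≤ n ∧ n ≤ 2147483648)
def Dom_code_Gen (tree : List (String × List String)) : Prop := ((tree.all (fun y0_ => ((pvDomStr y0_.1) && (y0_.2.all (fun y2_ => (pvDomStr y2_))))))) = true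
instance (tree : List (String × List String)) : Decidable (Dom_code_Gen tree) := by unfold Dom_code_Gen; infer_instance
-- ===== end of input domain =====

-- Alternative algorithm: B replaces A's per-root-character scan over all node strings by one
-- reverse pass over the node values distributing each bit to the (deduplicated) characters each
-- value contains; proved to return A's exact dict wherever A returns (Pre_ excludes only A's raises).


-- ===== PORT A =====
-- Codes are built on List Char (String.append is kernel-opaque) and wrapped with String.mk at
-- the dict boundary; 'char in child[0]' for the 1-char string char is membership in its chars;
-- child[1] is read through getD 1 "" — exact under Pre_, which excludes exactly the inputs
-- where A's elif actually evaluates child[1] out of range (IndexError).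
def code_Gen (tree : List (String × List String)) : List (String × String) :=
  let d := PySem.Dict.ofList tree
  match PySem.List.max? d.keys (fun x => PySem.Str.len x) with
  | none => []            -- unreachable under Pre_ (max() of an empty dict raises ValueError)
  | some root =>
    (root.toList.foldl (fun cd c =>
        let code := d.values.foldl (fun code child =>
          if child.isEmpty then code          -- 'else: continue'
          else if c ∈ (child.headD "").toList then '0' :: code
          else if c ∈ (child.getD 1 "").toList then '1' :: code
          else code) ([] : List Char)
        cd.insert c code) (PySem.Dict.empty : PySem.Dict Char (List Char))).items.map
      (fun p => (String.mk [p.1], String.mk p.2))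

-- ===== PORT B =====
-- Source B's 'child[1] if len(child) > 1 else \'\'' is exactly getD 1 "".
def code_Gen_alt (tree : List (String × List String)) : List (String × String) :=
  let d := PySem.Dict.ofList tree
  match PySem.List.max? d.keys (fun x => PySem.Str.len x) with
  | none => []            -- unreachable under Pre_
  | some root =>
    let codes0 : PySem.Dict Char (List Char) :=
      root.toList.foldl (fun cd c => cd.insert c []) PySem.Dict.empty
    let codes := d.values.reverse.foldl (fun cd child =>
      if child.isEmpty then cd
      else
        let zero := PySem.List.dedup (child.headD "").toList
        let cd1 := zero.foldl (fun cd c =>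
          if cd.contains c then cd.insert c (cd.getD c [] ++ ['0']) else cd) cd
        (PySem.List.dedup (child.getD 1 "").toList).foldl (fun cd c =>
          if c ∉ zero ∧ cd.contains c then cd.insert c (cd.getD c [] ++ ['1']) else cd) cd1)
      codes0
    codes.items.map (fun p => (String.mk [p.1], String.mk p.2))

-- ===== PRECONDITION & SPEC =====
-- the root key A iterates over: the first longest key of the dict
def pvRoot (tree : List (String × List String)) : String :=
  (PySem.List.max? (PySem.Dict.ofList tree).keys (fun x => PySem.Str.len x)).getD ""
-- Pre_ excludes exactly the inputs where A raises: the empty dict (max() raises ValueError) and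
-- dicts having a length-1 value whose [0] string misses some root character (the elif then reads
-- child[1], IndexError); on every other input A returns and B matches it.
def Pre_code_Gen (tree : List (String × List String)) : Prop :=
  tree ≠ [] ∧ ∀ v ∈ (PySem.Dict.ofList tree).values, v.length = 1 →
    ∀ c ∈ (pvRoot tree).toList, c ∈ (v.headD "").toList
instance (tree : List (String × List String)) : Decidable (Pre_code_Gen tree) := by
  unfold Pre_code_Gen; infer_instance
def pvWitness_code_Gen : (List (String × List String)) :=
  [("ab", ["a", "b"]), ("a", []), ("b", [])]
def Spec_code_Gen (tree : List (String × List String)) (out : List (String × String)) : Prop := out = code_Gen_alt tree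
instance (tree : List (String × List String)) (out : List (String × String)) : Decidable (Spec_code_Gen tree out) := by unfold Spec_code_Gen; infer_instance

-- ===== CLAIM (what is proved, stated in full; the proofs are below) =====
def Claim_equal_code_Gen : Prop := ∀ (tree : List (String × List String)), Dom_code_Gen tree → Pre_code_Gen tree → Spec_code_Gen tree (code_Gen tree)

-- ===== LEMMAS AND PROOFS =====

-- a dict whose value at each key is a function of the key alone
def pvDictOf (s : List Char) (f : Char → List Char) : PySem.Dict Char (List Char) :=
  PySem.Dict.mk (s.map (fun c => (c, f c)))

theorem pvDictOf_keys (s : List Char) (f : Char → List Char) :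
    (pvDictOf s f).keys = s := by
  simp [pvDictOf, PySem.Dict.keys, Function.comp_def]

theorem pvDictOf_congr (s : List Char) {f g : Char → List Char}
    (h : ∀ c ∈ s, f c = g c) : pvDictOf s f = pvDictOf s g := by
  unfold pvDictOf
  exact congrArg PySem.Dict.mk (List.map_congr_left (fun c hc => by rw [h c hc]))

theorem pvDictOf_contains (s : List Char) (f : Char → List Char) (x : Char) :
    (pvDictOf s f).contains x = decide (x ∈ s) := by
  rw [PySem.Dict.contains_eq_decide_mem_keys, pvDictOf_keys]

theorem pvDictOf_mem_items (s : List Char) (f : Char → List Char) {x : Char} (hx : x ∈ s) :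
    (x, f x) ∈ (pvDictOf s f).items := by
  show (x, f x) ∈ s.map (fun c => (c, f c))
  exact List.mem_map.mpr ⟨x, hx, rfl⟩

theorem pvDictOf_getD (s : List Char) (f : Char → List Char) (x : Char)
    (hs : s.Nodup) (hx : x ∈ s) : (pvDictOf s f).getD x [] = f x := by
  exact PySem.Dict.getD_of_mem_items _ (pvDictOf_mem_items s f hx)
    (by rw [pvDictOf_keys]; exact hs) []

theorem pvDictOf_insert (s : List Char) (f : Char → List Char) (x : Char) (v : List Char)
    (hx : x ∈ s) :
    (pvDictOf s f).insert x v = pvDictOf s (fun c => if c = x then v else f c) := by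
  apply PySem.Dict.ext
  rw [PySem.Dict.items_insert_of_contains _ _ (by rw [pvDictOf_contains]; simpa)]
  simp only [pvDictOf, List.map_map]
  apply List.map_congr_left
  intro c _
  by_cases h : c = x <;> simp [h]

theorem pvDictOf_insert_new (s : List Char) (f : Char → List Char) (x : Char)
    (hx : x ∉ s) :
    (pvDictOf s f).insert x (f x) = pvDictOf (s ++ [x]) f := by
  apply PySem.Dict.ext
  rw [PySem.Dict.items_insert_of_not_contains _ _ (by rw [pvDictOf_contains]; simpa)]
  simp [pvDictOf]

-- the insert loop building a keyed-by-function dict (A's outer loop and B's initialisation)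
theorem pvFoldl_insert_fn (R : List Char) (f : Char → List Char)
    (s : List Char) (hs : s.Nodup) :
    R.foldl (fun cd c => cd.insert c (f c)) (pvDictOf s f)
      = pvDictOf (PySem.Set.update s R) f := by
  induction R generalizing s with
  | nil => simp [PySem.Set.update]
  | cons x R ih =>
    simp only [List.foldl_cons, PySem.Set.update_cons]
    by_cases hx : x ∈ s
    · rw [pvDictOf_insert s f x (f x) hx,
        pvDictOf_congr s (g := f) (by intro c _; split <;> simp_all),
        ih s hs, PySem.Set.add_of_mem hx]
    · rw [pvDictOf_insert_new s f x hx,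
        ih (s ++ [x]) (by simp [List.nodup_append, hs]; exact fun a ha h => hx (h ▸ ha)),
        PySem.Set.add_of_not_mem hx]

theorem pvFoldl_insert_empty (R : List Char) (f : Char → List Char) :
    R.foldl (fun cd c => cd.insert c (f c)) (PySem.Dict.empty : PySem.Dict Char (List Char))
      = pvDictOf (PySem.Set.ofList R) f := by
  rw [show (PySem.Dict.empty : PySem.Dict Char (List Char)) = pvDictOf [] f from rfl,
    pvFoldl_insert_fn _ _ [] List.nodup_nil, PySem.Set.update_nil_left]

-- B's '0'-distribution loop over a duplicate-free char list
theorem pvDistribute0 (zs : List Char) (hzs : zs.Nodup)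
    (s : List Char) (hs : s.Nodup) (f : Char → List Char) :
    zs.foldl (fun cd c =>
        if cd.contains c then cd.insert c (cd.getD c [] ++ ['0']) else cd) (pvDictOf s f)
      = pvDictOf s (fun c => if c ∈ zs ∧ c ∈ s then f c ++ ['0'] else f c) := by
  induction zs generalizing f with
  | nil => exact (pvDictOf_congr s (by intro c _; simp)).symm
  | cons z zs ih =>
    have hz : z ∉ zs := (List.nodup_cons.mp hzs).1
    simp only [List.foldl_cons]
    by_cases hmem : z ∈ s
    · rw [if_pos (by rw [pvDictOf_contains]; simpa),
        pvDictOf_getD s f z hs hmem, pvDictOf_insert s f z _ hmem,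
        ih (List.nodup_cons.mp hzs).2]
      apply pvDictOf_congr
      intro c hc
      by_cases h1 : c = z
      · subst h1; simp [hmem, hz]
      · simp [h1]
    · rw [if_neg (by rw [pvDictOf_contains]; simp [hmem]),
        ih (List.nodup_cons.mp hzs).2]
      apply pvDictOf_congr
      intro c hc
      by_cases h1 : c = z
      · subst h1; simp [hmem]
      · simp [h1]

-- B's '1'-distribution loop (same loop with the 'not already coded 0' test)
theorem pvDistribute1 (zs : List Char) (hzs : zs.Nodup) (ex : List Char)
    (s : List Char) (hs : s.Nodup) (f : Char → List Char) :
    zs.foldl (fun cd c =>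
        if c ∉ ex ∧ cd.contains c then cd.insert c (cd.getD c [] ++ ['1']) else cd)
        (pvDictOf s f)
      = pvDictOf s (fun c => if c ∈ zs ∧ c ∉ ex ∧ c ∈ s then f c ++ ['1'] else f c) := by
  induction zs generalizing f with
  | nil => exact (pvDictOf_congr s (by intro c _; simp)).symm
  | cons z zs ih =>
    have hz : z ∉ zs := (List.nodup_cons.mp hzs).1
    simp only [List.foldl_cons]
    by_cases hcond : z ∉ ex ∧ z ∈ s
    · rw [if_pos ⟨hcond.1, by rw [pvDictOf_contains]; simpa using hcond.2⟩,
        pvDictOf_getD s f z hs hcond.2, pvDictOf_insert s f z _ hcond.2,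
        ih (List.nodup_cons.mp hzs).2]
      apply pvDictOf_congr
      intro c hc
      by_cases h1 : c = z
      · subst h1; simp [hcond.1, hcond.2, hz]
      · simp [h1]
    · rw [if_neg (by rw [pvDictOf_contains]; simpa using hcond),
        ih (List.nodup_cons.mp hzs).2]
      apply pvDictOf_congr
      intro c hc
      by_cases h1 : c = z
      · subst h1
        rcases not_and_or.mp hcond with h | h <;> simp [h]
      · simp [h1]

-- the bit contributed by one child to character c (A's branch structure)
def pvBit (child : List String) (c : Char) : List Char :=
  if child.isEmpty then []
  else if c ∈ (child.headD "").toList then ['0']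
  else if c ∈ (child.getD 1 "").toList then ['1']
  else []

-- B's whole reverse pass over the children, starting from a keyed-by-function dict
theorem pvOuter (C : List (List String)) (s : List Char) (hs : s.Nodup)
    (f : Char → List Char) :
    C.foldl (fun cd child =>
        if child.isEmpty then cd
        else
          let zero := PySem.List.dedup (child.headD "").toList
          let cd1 := zero.foldl (fun cd c =>
            if cd.contains c then cd.insert c (cd.getD c [] ++ ['0']) else cd) cd
          (PySem.List.dedup (child.getD 1 "").toList).foldl (fun cd c =>
            if c ∉ zero ∧ cd.contains c then cd.insert c (cd.getD c [] ++ ['1']) else cd) cd1)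
      (pvDictOf s f)
      = pvDictOf s (fun c => f c ++ (C.map (fun child => pvBit child c)).flatten) := by
  induction C generalizing f with
  | nil => exact (pvDictOf_congr s (by intro c _; simp)).symm
  | cons child C ih =>
    simp only [List.foldl_cons]
    have hstep :
        (if child.isEmpty then pvDictOf s f
         else
           let zero := PySem.List.dedup (child.headD "").toList
           let cd1 := zero.foldl (fun cd c =>
             if cd.contains c then cd.insert c (cd.getD c [] ++ ['0']) else cd) (pvDictOf s f)
           (PySem.List.dedup (child.getD 1 "").toList).foldl (fun cd c =>
             if c ∉ zero ∧ cd.contains c then cd.insert c (cd.getD c [] ++ ['1']) else cd) cd1)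
          = pvDictOf s (fun c => f c ++ pvBit child c) := by
      by_cases hE : child.isEmpty
      · rw [if_pos hE]
        exact pvDictOf_congr s (by intro c _; simp [pvBit, hE])
      · rw [if_neg hE]
        simp only []
        rw [pvDistribute0 _ (PySem.List.nodup_dedup _) s hs f,
          pvDistribute1 _ (PySem.List.nodup_dedup _) _ s hs _]
        apply pvDictOf_congr
        intro c hc
        simp only [PySem.List.mem_dedup, pvBit]
        split_ifs <;> simp_all
    rw [hstep, ih]
    exact pvDictOf_congr s (by intro c _; simp)

-- A's inner loop produces exactly the reversed concatenation of the per-child bits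
theorem pvInner (C : List (List String)) (c : Char) (acc : List Char) :
    C.foldl (fun code child =>
        if child.isEmpty then code
        else if c ∈ (child.headD "").toList then '0' :: code
        else if c ∈ (child.getD 1 "").toList then '1' :: code
        else code) acc
      = (C.reverse.map (fun child => pvBit child c)).flatten ++ acc := by
  induction C generalizing acc with
  | nil => simp
  | cons child C ih =>
    simp only [List.foldl_cons, List.reverse_cons, List.map_append, List.flatten_append]
    rw [ih]
    have : (if child.isEmpty then acc
        else if c ∈ (child.headD "").toList then '0' :: acc
        else if c ∈ (child.getD 1 "").toList then '1' :: acc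
        else acc) = pvBit child c ++ acc := by
      unfold pvBit
      split_ifs <;> simp
    rw [this]
    simp

-- ===== VERDICT (by name: the statement is the Claim_ definition above) =====
theorem code_Gen_spec : Claim_equal_code_Gen := by
  intro tree _ _
  unfold Spec_code_Gen code_Gen code_Gen_alt
  simp only []
  cases hmax : PySem.List.max? (PySem.Dict.ofList tree).keys (fun x => PySem.Str.len x) with
  | none => rfl
  | some root =>
    have hnd : (PySem.Set.ofList root.toList).Nodup := PySem.Set.nodup_ofList _
    dsimp only
    rw [pvFoldl_insert_empty, pvFoldl_insert_empty, pvOuter _ _ hnd,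
      pvDictOf_congr (PySem.Set.ofList root.toList)
        (g := fun c => ((PySem.Dict.ofList tree).values.reverse.map
          (fun child => pvBit child c)).flatten)
        (by intro c _; rw [pvInner]; simp)]
    exact congrArg _ (congrArg _ (pvDictOf_congr _ (by intro c _; simp)))
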